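-- pv_equiv track=rewrite | github.com/amol-ship-it/agi-core | domains/arc/primitives.py | fill_stripe_gaps_h
-- ===== SOURCE A (Python) =====
-- Grid = list[list[int]]
--
-- def fill_stripe_gaps_h(grid: Grid) -> Grid:
--     """Fill bg cells between same-color cells within each row."""
--     if not grid or not grid[0]:
--         return grid
--     result = [row[:] for row in grid]
--     for r in range(len(result)):
--         row = result[r]
--         w = len(row)
--         for _ in range(w):
--             changed = False
--             for c in range(1, w - 1):
--                 if row[c] == 0:
--                     if row[c - 1] != 0 and row[c - 1] == row[c + 1]:
--                         row[c] = row[c - 1]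
--                         changed = True
--             if not changed:
--                 break
--     return result
-- ===== SOURCE B (Python) =====
-- def fill_stripe_gaps_h(grid):
--     """Fill bg cells between same-color cells within each row (single pass per row)."""
--     if not grid or not grid[0]:
--         return grid
--
--     def fill_row(row):
--         out = []
--         prev = None
--         n = len(row)
--         for i, x in enumerate(row):
--             if x == 0 and prev is not None and prev != 0 and i + 1 < n and row[i + 1] == prev:
--                 x = prev
--             out.append(x)
--             prev = x
--         return out
--
--     return [fill_row(row) for row in grid]
-- ===== Notes on version B (the rewrite author's own statement) =====
-- stated objective: simpler
-- what changed: A repeatedly sweeps each row (up to w passes with a changed flag) mutating in place; B does one left-to-right scan per row carrying the previous output value, since the fill condition requires a nonzero left neighbour and thus one pass already reaches the fixpoint.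
import Mathlib
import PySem

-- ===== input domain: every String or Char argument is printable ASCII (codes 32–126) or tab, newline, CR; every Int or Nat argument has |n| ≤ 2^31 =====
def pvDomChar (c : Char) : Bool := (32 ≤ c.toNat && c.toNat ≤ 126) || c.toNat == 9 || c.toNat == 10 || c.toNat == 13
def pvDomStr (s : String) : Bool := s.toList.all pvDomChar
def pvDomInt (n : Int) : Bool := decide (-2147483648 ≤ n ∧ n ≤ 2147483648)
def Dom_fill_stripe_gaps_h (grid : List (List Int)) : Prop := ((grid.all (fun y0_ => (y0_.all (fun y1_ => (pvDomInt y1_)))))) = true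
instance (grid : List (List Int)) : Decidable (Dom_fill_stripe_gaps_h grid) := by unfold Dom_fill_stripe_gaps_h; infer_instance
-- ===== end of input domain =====

-- B replaces A's repeat-until-unchanged nested passes per row by a single left-to-right scan
-- (one pass already reaches the fixpoint); objective: simpler, same return value.

-- ===== PORT A =====
-- inner loop `for c in range(1, w - 1)`; all row[c±1] accesses are in range there, so getD _ 0 is exact
def fillInnerA (w : Nat) (c : Nat) (row : List Int) (changed : Bool) : List Int × Bool :=
  if _h : c + 1 < w then
    if row.getD c 0 = 0 ∧ row.getD (c - 1) 0 ≠ 0 ∧ row.getD (c - 1) 0 = row.getD (c + 1) 0 then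
      fillInnerA w (c + 1) (row.set c (row.getD (c - 1) 0)) true
    else
      fillInnerA w (c + 1) row changed
  else (row, changed)
termination_by w - c

-- outer loop `for _ in range(w): changed = False; <inner>; if not changed: break`
def fillOuterA (w : Nat) : Nat → List Int → List Int
  | 0, row => row
  | n + 1, row =>
    let p := fillInnerA w 1 row false
    if p.2 then fillOuterA w n p.1 else p.1

def fill_stripe_gaps_h (grid : List (List Int)) : List (List Int) :=
  if grid.isEmpty || (grid.headD []).isEmpty then grid
  else grid.map (fun row => fillOuterA row.length row.length row)

-- ===== PORT B =====
-- single left-to-right scan carrying the previous (already output) value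
def scanB : Int → List Int → List Int
  | _, [] => []
  | _, [x] => [x]
  | prev, x :: y :: r =>
    let x' := if x = 0 ∧ prev ≠ 0 ∧ prev = y then prev else x
    x' :: scanB x' (y :: r)

def fillRowB : List Int → List Int
  | [] => []
  | x :: t => x :: scanB x t

def fill_stripe_gaps_h_alt (grid : List (List Int)) : List (List Int) :=
  if grid.isEmpty || (grid.headD []).isEmpty then grid
  else grid.map fillRowB

-- ===== PRECONDITION & SPEC =====
def Spec_fill_stripe_gaps_h (grid : List (List Int)) (out : List (List Int)) : Prop := out = fill_stripe_gaps_h_alt grid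
instance (grid : List (List Int)) (out : List (List Int)) : Decidable (Spec_fill_stripe_gaps_h grid out) := by unfold Spec_fill_stripe_gaps_h; infer_instance

-- ===== CLAIM (what is proved, stated in full; the proofs are below) =====
def Claim_equal_fill_stripe_gaps_h : Prop := ∀ (grid : List (List Int)), Dom_fill_stripe_gaps_h grid → Spec_fill_stripe_gaps_h grid (fill_stripe_gaps_h grid)

-- ===== LEMMAS AND PROOFS =====

-- proof-only variant of B's scan that also reports A's `changed` flag
def scanC : Int → List Int → List Int × Bool
  | _, [] => ([], false)
  | _, [x] => ([x], false)
  | prev, x :: y :: r =>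
    let x' := if x = 0 ∧ prev ≠ 0 ∧ prev = y then prev else x
    let s := scanC x' (y :: r)
    (x' :: s.1, (decide (x = 0 ∧ prev ≠ 0 ∧ prev = y)) || s.2)

theorem scanC_fst : ∀ (prev : Int) (t : List Int), (scanC prev t).1 = scanB prev t
  | _, [] => rfl
  | _, [_] => rfl
  | prev, x :: y :: r => by
    simp only [scanC, scanB]
    exact congrArg _ (scanC_fst _ (y :: r))

theorem scanC_len : ∀ (prev : Int) (t : List Int), (scanC prev t).1.length = t.length
  | _, [] => rfl
  | _, [_] => rfl
  | prev, x :: y :: r => by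
    simp only [scanC, List.length_cons]
    exact congrArg _ (scanC_len _ (y :: r))

theorem scanB_len : ∀ (prev : Int) (t : List Int), (scanB prev t).length = t.length
  | _, [] => rfl
  | _, [_] => rfl
  | prev, x :: y :: r => by
    simp only [scanB, List.length_cons]
    exact congrArg _ (scanB_len _ (y :: r))

theorem scanC_short (prev : Int) (t : List Int) (h : t.length ≤ 1) : (scanC prev t).2 = false := by
  match t with
  | [] => rfl
  | [_] => rfl
  | _ :: _ :: _ => simp at h

theorem getD_app : ∀ (pre l : List Int) (n : Nat), (pre ++ l).getD (pre.length + n) 0 = l.getD n 0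
  | [], l, n => by simp
  | a :: pre, l, n => by
    simpa [Nat.succ_add] using getD_app pre l n

theorem set_app : ∀ (pre l : List Int) (n : Nat) (v : Int),
    (pre ++ l).set (pre.length + n) v = pre ++ l.set n v
  | [], l, n, v => by simp
  | a :: pre, l, n, v => by
    simpa [Nat.succ_add] using set_app pre l n v

-- A's inner pass, started at column pre.length+1 on row pre ++ prev :: tail, is scanC
theorem innerA_eq : ∀ (tail : List Int) (prev : Int) (pre : List Int) (changed : Bool),
    fillInnerA (pre.length + 1 + tail.length) (pre.length + 1) (pre ++ prev :: tail) changed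
      = (pre ++ prev :: (scanC prev tail).1, changed || (scanC prev tail).2)
  | [], prev, pre, changed => by
    rw [fillInnerA]
    simp [scanC]
  | [x], prev, pre, changed => by
    rw [fillInnerA]
    simp [scanC]
  | x :: y :: r, prev, pre, changed => by
    rw [fillInnerA]
    have hc : pre.length + 1 + 1 < pre.length + 1 + (x :: y :: r).length := by
      simp only [List.length_cons]; omega
    rw [dif_pos hc]
    have e0 : (pre ++ prev :: x :: y :: r).getD (pre.length + 1 - 1) 0 = prev := by
      simpa using getD_app pre (prev :: x :: y :: r) 0
    have e1 : (pre ++ prev :: x :: y :: r).getD (pre.length + 1) 0 = x :=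
      getD_app pre (prev :: x :: y :: r) 1
    have e2 : (pre ++ prev :: x :: y :: r).getD (pre.length + 1 + 1) 0 = y := by
      have := getD_app pre (prev :: x :: y :: r) 2
      simpa [Nat.add_assoc] using this
    rw [e0, e1, e2]
    by_cases hcond : x = 0 ∧ prev ≠ 0 ∧ prev = y
    · rw [if_pos hcond]
      have hset : (pre ++ prev :: x :: y :: r).set (pre.length + 1) prev
          = (pre ++ [prev]) ++ prev :: y :: r := by
        have := set_app pre (prev :: x :: y :: r) 1 prev
        simpa [List.append_assoc] using this
      rw [hset]
      have ih := innerA_eq (y :: r) prev (pre ++ [prev]) true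
      have hw : (pre ++ [prev]).length + 1 + (y :: r).length
          = pre.length + 1 + (x :: y :: r).length := by simp; omega
      have hcN : (pre ++ [prev]).length + 1 = pre.length + 1 + 1 := by simp
      rw [hw, hcN] at ih
      rw [ih]
      simp only [scanC, if_pos hcond, Prod.mk.injEq]
      constructor
      · simp [List.append_assoc]
      · obtain ⟨hx0, hp0, hpy⟩ := hcond
        subst hpy
        simp [hx0, hp0]
    · rw [if_neg hcond]
      have hrow : pre ++ prev :: x :: y :: r = (pre ++ [prev]) ++ x :: y :: r := by
        simp [List.append_assoc]
      rw [hrow]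
      have ih := innerA_eq (y :: r) x (pre ++ [prev]) changed
      have hw : (pre ++ [prev]).length + 1 + (y :: r).length
          = pre.length + 1 + (x :: y :: r).length := by simp; omega
      have hcN : (pre ++ [prev]).length + 1 = pre.length + 1 + 1 := by simp
      rw [hw, hcN] at ih
      rw [ih]
      simp only [scanC, if_neg hcond, Prod.mk.injEq]
      constructor
      · simp [List.append_assoc]
      · simp [hcond]

-- when prev = 0 the first element of the scan is never filled
theorem scanB_zero (y : Int) (r : List Int) : scanB 0 (y :: r) = y :: scanB y r := by
  match r with
  | [] => rfl
  | y2 :: r2 => simp [scanB]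

-- the single pass reaches the fixpoint: a second pass finds nothing to change
theorem scanC_fix : ∀ (t : List Int) (prev : Int), scanC prev (scanB prev t) = (scanB prev t, false)
  | [], prev => rfl
  | [x], prev => rfl
  | x :: y :: r, prev => by
    simp only [scanB]
    set x' := if x = 0 ∧ prev ≠ 0 ∧ prev = y then prev else x with hx'
    have hne : scanB x' (y :: r) ≠ [] := by
      intro h
      have := scanB_len x' (y :: r)
      rw [h] at this
      simp at this
    obtain ⟨h, rest, he⟩ : ∃ h rest, scanB x' (y :: r) = h :: rest := by
      cases hsb : scanB x' (y :: r) with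
      | nil => exact absurd hsb hne
      | cons a l => exact ⟨a, l, rfl⟩
    rw [he]
    have hncond : ¬ (x' = 0 ∧ prev ≠ 0 ∧ prev = h) := by
      by_cases hcond : x = 0 ∧ prev ≠ 0 ∧ prev = y
      · have : x' = prev := by rw [hx', if_pos hcond]
        rw [this]
        rintro ⟨h0, hne0, _⟩
        exact hne0 h0
      · have hx : x' = x := by rw [hx', if_neg hcond]
        by_cases hx0 : x = 0
        · have hh : h = y := by
            have : scanB x' (y :: r) = y :: scanB y r := by
              rw [hx, hx0]; exact scanB_zero y r
            rw [he] at this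
            exact (List.cons.injEq _ _ _ _ ▸ this).1
          rw [hx, hh]
          rintro ⟨_, hp0, hpy⟩
          exact hcond ⟨hx0, hp0, hpy⟩
        · rw [hx]
          rintro ⟨h0, _, _⟩
          exact hx0 h0
    simp only [scanC, if_neg hncond]
    have ih := scanC_fix (y :: r) x'
    rw [← he, ih]
    simp [hncond]

-- A's per-row loop equals B's per-row scan
theorem rowA_eq (row : List Int) : fillOuterA row.length row.length row = fillRowB row := by
  cases row with
  | nil => rfl
  | cons x t =>
    have h1 : fillInnerA (x :: t).length 1 (x :: t) false
        = (x :: (scanC x t).1, (scanC x t).2) := by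
      have h := innerA_eq t x [] false
      simp only [List.length_nil, List.nil_append, Nat.zero_add] at h
      rwa [Nat.add_comm 1 t.length] at h
    show fillOuterA (x :: t).length (x :: t).length (x :: t) = fillRowB (x :: t)
    have hlen : (x :: t).length = t.length + 1 := by simp
    rw [hlen]
    rw [fillOuterA]
    rw [hlen] at h1
    simp only [h1]
    by_cases hch : (scanC x t).2 = true
    · rw [if_pos hch]
      have ht2 : 2 ≤ t.length := by
        by_contra hlt
        have : (scanC x t).2 = false := scanC_short x t (by omega)
        rw [this] at hch; exact Bool.false_ne_true hch
      obtain ⟨m, hm⟩ : ∃ m, t.length = m + 2 := ⟨t.length - 2, by omega⟩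
      rw [hm]
      rw [fillOuterA]
      have h2 : fillInnerA (m + 2 + 1) 1 (x :: (scanC x t).1) false
          = (x :: (scanC x (scanC x t).1).1, (scanC x (scanC x t).1).2) := by
        have h := innerA_eq ((scanC x t).1) x [] false
        have hl : (scanC x t).1.length = m + 2 := by rw [scanC_len]; exact hm
        rw [hl] at h
        simp only [List.length_nil, List.nil_append, Nat.zero_add] at h
        rwa [Nat.add_comm 1 (m + 2)] at h
      rw [scanC_fst] at h2 ⊢
      rw [scanC_fix t x] at h2
      simp only [h2]
      simp [fillRowB]
    · rw [if_neg hch]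
      simp [fillRowB, scanC_fst]

-- ===== VERDICT (by name: the statement is the Claim_ definition above) =====
theorem fill_stripe_gaps_h_spec : Claim_equal_fill_stripe_gaps_h := by
  intro grid _
  unfold Spec_fill_stripe_gaps_h fill_stripe_gaps_h fill_stripe_gaps_h_alt
  split
  · rfl
  · exact List.map_congr_left (fun row _ => rowA_eq row)
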